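-- pv_equiv track=rewrite | github.com/putmanmodel/dialogue-tone-workbench | modules/normalization.py | mentions_testing
-- ===== SOURCE A (Python) =====
-- def mentions_testing(text: str) -> bool:
--     lowered = text.lower()
--     exact_or_prefix = [
--         "test",
--         "testing",
--         "testing this",
--         "does this work",
--         "can you hear me",
--         "is this working",
--         "is this coming through",
--         "just testing",
--     ]
--     return any(lowered == phrase or lowered.startswith(f"{phrase}?") or lowered.startswith(f"{phrase}.") for phrase in exact_or_prefix)
-- ===== SOURCE B (Python) =====
-- PHRASES = {
--     "test",
--     "testing",
--     "testing this",
--     "does this work",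
--     "can you hear me",
--     "is this working",
--     "is this coming through",
--     "just testing",
-- }
--
--
-- def mentions_testing(text: str) -> bool:
--     lowered = text.lower()
--     head = lowered.split(".", 1)[0].split("?", 1)[0]
--     return head in PHRASES
-- ===== Notes on version B (the rewrite author's own statement) =====
-- stated objective: simpler
-- what changed: Instead of looping over the 8 phrases and testing equality / startswith-with-'?' / startswith-with-'.' for each, B cuts the lowered text at the first '.' or '?' once and does a single set-membership test of that head.
import Mathlib
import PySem

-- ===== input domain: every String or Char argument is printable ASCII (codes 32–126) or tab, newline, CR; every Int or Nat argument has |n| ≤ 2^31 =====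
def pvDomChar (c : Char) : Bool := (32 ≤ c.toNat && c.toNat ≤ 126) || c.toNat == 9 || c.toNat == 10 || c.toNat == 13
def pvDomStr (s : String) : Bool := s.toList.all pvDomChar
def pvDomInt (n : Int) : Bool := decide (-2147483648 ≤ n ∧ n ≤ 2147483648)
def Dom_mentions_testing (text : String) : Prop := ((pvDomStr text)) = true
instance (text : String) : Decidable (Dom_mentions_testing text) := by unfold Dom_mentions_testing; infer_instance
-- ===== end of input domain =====

-- B cuts the lowered text at the first '.' or '?' once and checks that head against the
-- 8-phrase set, instead of A's per-phrase equality/startswith loop (objective: simpler).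

-- ===== PORT A =====
def mentions_testing (text : String) : Bool :=
  let lowered := PySem.Str.lower text
  let exact_or_prefix : List String :=
    ["test", "testing", "testing this", "does this work", "can you hear me",
     "is this working", "is this coming through", "just testing"]
  exact_or_prefix.any (fun phrase =>
    lowered == phrase || PySem.Str.startswith lowered (phrase ++ "?")
      || PySem.Str.startswith lowered (phrase ++ "."))

-- ===== PORT B =====
-- lowered.split(".", 1)[0] is the prefix of `lowered` before the first '.', i.e. takeWhile (· ≠ '.');
-- exact on every input since the separator is a single character and only piece 0 is kept.
def mentions_testing_alt (text : String) : Bool :=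
  let lowered := PySem.Str.lower text
  let head := (lowered.toList.takeWhile (· ≠ '.')).takeWhile (· ≠ '?')
  (["test", "testing", "testing this", "does this work", "can you hear me",
    "is this working", "is this coming through", "just testing"].map String.toList).contains head

-- ===== PRECONDITION & SPEC =====
def Spec_mentions_testing (text : String) (out : Bool) : Prop := out = mentions_testing_alt text
instance (text : String) (out : Bool) : Decidable (Spec_mentions_testing text out) := by unfold Spec_mentions_testing; infer_instance

-- ===== CLAIM (what is proved, stated in full; the proofs are below) =====
def Claim_equal_mentions_testing : Prop := ∀ (text : String), Dom_mentions_testing text → Spec_mentions_testing text (mentions_testing text)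

-- ===== LEMMAS AND PROOFS =====

-- A's per-phrase test (equal, or phrase followed by '?' or '.') matches exactly when the
-- text cut at its first '.'/'?' equals the phrase, provided the phrase has no separator.
lemma pv_key (p : List Char) (hp : '.' ∉ p) (hq : '?' ∉ p) (l : List Char) :
    (l = p ∨ (p ++ ['?']) <+: l ∨ (p ++ ['.']) <+: l)
      ↔ (l.takeWhile (· ≠ '.')).takeWhile (· ≠ '?') = p := by
  induction p generalizing l with
  | nil =>
    cases l with
    | nil => simp
    | cons c t =>
      simp only [List.nil_append, List.cons_prefix_cons, List.nil_prefix, and_true]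
      by_cases h1 : c = '.' <;> by_cases h2 : c = '?' <;>
        simp_all
      exact ⟨fun h => h2 h.symm, fun h => h1 h.symm⟩
  | cons a p' ih =>
    have ha1 : a ≠ '.' := fun h => hp (h ▸ List.mem_cons_self)
    have ha2 : a ≠ '?' := fun h => hq (h ▸ List.mem_cons_self)
    have hp' : '.' ∉ p' := fun h => hp (List.mem_cons_of_mem _ h)
    have hq' : '?' ∉ p' := fun h => hq (List.mem_cons_of_mem _ h)
    cases l with
    | nil =>
      constructor
      · rintro (h | h | h) <;> simp_all [List.prefix_nil]
      · intro h; simp at h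
    | cons c t =>
      by_cases h1 : c = '.'
      · subst h1
        constructor
        · rintro (h | h | h)
          · exact absurd (List.cons_eq_cons.mp h).1.symm ha1
          · exact absurd ((List.cons_prefix_cons.mp h).1) ha1
          · exact absurd ((List.cons_prefix_cons.mp h).1) ha1
        · intro h; simp at h
      · by_cases h2 : c = '?'
        · subst h2
          constructor
          · rintro (h | h | h)
            · exact absurd (List.cons_eq_cons.mp h).1.symm ha2
            · exact absurd ((List.cons_prefix_cons.mp h).1) ha2
            · exact absurd ((List.cons_prefix_cons.mp h).1) ha2
          · intro h; simp [h1] at h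
        · have hrw : ((c :: t).takeWhile (· ≠ '.')).takeWhile (· ≠ '?')
              = c :: ((t.takeWhile (· ≠ '.')).takeWhile (· ≠ '?')) := by
            simp [h1, h2]
          rw [hrw]
          simp only [List.cons_append, List.cons_prefix_cons, List.cons.injEq]
          rw [← ih hp' hq']
          constructor
          · rintro (⟨he, ht⟩ | ⟨he, ht⟩ | ⟨he, ht⟩) <;> subst he <;> tauto
          · rintro ⟨he, ht | ht | ht⟩ <;> subst he <;> tauto

-- Bool form of pv_key, stated on the String pieces the ports use.
lemma pv_keyB (p : String) (hp : '.' ∉ p.toList) (hq : '?' ∉ p.toList) (l : String) :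
    (l == p || PySem.Str.startswith l (p ++ "?") || PySem.Str.startswith l (p ++ "."))
      = ((l.toList.takeWhile (· ≠ '.')).takeWhile (· ≠ '?') == p.toList) := by
  rw [Bool.eq_iff_iff]
  simp only [Bool.or_eq_true, beq_iff_eq, PySem.Str.startswith_eq,
    PySem.Chars.startswith_iff, String.toList_append, ← String.toList_inj,
    or_assoc]
  have : ("?" : String).toList = ['?'] := rfl
  have h2 : ("." : String).toList = ['.'] := rfl
  rw [this, h2]
  exact pv_key p.toList hp hq l.toList

-- ===== VERDICT (by name: the statement is the Claim_ definition above) =====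
theorem mentions_testing_spec : Claim_equal_mentions_testing := by
  intro text _
  unfold Spec_mentions_testing
  simp only [mentions_testing, mentions_testing_alt, List.any_cons, List.any_nil,
    List.map_cons, List.map_nil, List.contains_cons, List.contains_nil, Bool.or_false]
  rw [pv_keyB _ (by decide) (by decide), pv_keyB _ (by decide) (by decide),
    pv_keyB _ (by decide) (by decide), pv_keyB _ (by decide) (by decide),
    pv_keyB _ (by decide) (by decide), pv_keyB _ (by decide) (by decide),
    pv_keyB _ (by decide) (by decide), pv_keyB _ (by decide) (by decide)]
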